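-- pv_equiv track=rewrite | github.com/malicorX/ai2ai | backend/app/analyze_run.py | switches
-- ===== SOURCE A (Python) =====
-- def switches(seq: list[str]) -> int:
--     if not seq:
--         return 0
--     s = 0
--     last = seq[0]
--     for x in seq[1:]:
--         if x != last:
--             s += 1
--             last = x
--     return s
-- ===== SOURCE B (Python) =====
-- def switches(seq: list[str]) -> int:
--     # Divide and conquer: switches in seq[lo:hi] = switches in each half
--     # plus 1 if the values disagree across the split point.
--     def rec(lo: int, hi: int) -> int:
--         if hi - lo < 2:
--             return 0
--         mid = (lo + hi) // 2
--         boundary = 1 if seq[mid] != seq[mid - 1] else 0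
--         return rec(lo, mid) + rec(mid, hi) + boundary
--     return rec(0, len(seq))
-- ===== Notes on version B (the rewrite author's own statement) =====
-- stated objective: alternative
-- what changed: B replaces A's single left-to-right scan with last/accumulator state by a stateless divide-and-conquer recursion: split the index interval at its midpoint, recurse on both halves, and add 1 when the two values adjacent to the split differ.
import Mathlib
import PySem

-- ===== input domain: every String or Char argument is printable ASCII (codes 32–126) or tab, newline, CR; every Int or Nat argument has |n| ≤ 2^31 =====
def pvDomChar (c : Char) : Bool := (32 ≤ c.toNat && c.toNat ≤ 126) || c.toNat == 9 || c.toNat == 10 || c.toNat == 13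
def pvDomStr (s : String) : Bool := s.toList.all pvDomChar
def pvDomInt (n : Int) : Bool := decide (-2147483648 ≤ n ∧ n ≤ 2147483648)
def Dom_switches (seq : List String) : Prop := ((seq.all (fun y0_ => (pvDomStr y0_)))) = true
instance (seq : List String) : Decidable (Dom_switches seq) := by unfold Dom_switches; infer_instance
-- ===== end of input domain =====

-- B replaces A's left-to-right scan with a divide-and-conquer recursion on index intervals (same cost, different structure).


-- ===== PORT A =====
-- A's for-loop over seq[1:] with state (s, last), as structural recursion
def switchesGo (last : String) (s : Int) : List String → Int
  | [] => s
  | x :: xs => if x ≠ last then switchesGo x (s + 1) xs else switchesGo last s xs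

def switches (seq : List String) : Int :=
  match seq with
  | [] => 0
  | first :: rest => switchesGo first 0 rest

-- ===== PORT B =====
-- Source B's inner rec(lo, hi): split at mid = (lo+hi)//2, recurse on both halves,
-- add 1 if seq[mid] != seq[mid-1] (indexing via pyGet?, always in range when reached)
def switchesAltRec (seq : List String) (lo hi : Int) : Int :=
  if _h : hi - lo < 2 then 0
  else
    switchesAltRec seq lo (PySem.Int.floordiv (lo + hi) 2) +
    switchesAltRec seq (PySem.Int.floordiv (lo + hi) 2) hi +
    (if PySem.List.pyGet? seq (PySem.Int.floordiv (lo + hi) 2) ≠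
        PySem.List.pyGet? seq (PySem.Int.floordiv (lo + hi) 2 - 1) then 1 else 0)
termination_by (hi - lo).toNat
decreasing_by
  all_goals
    rw [PySem.Int.floordiv_eq_ediv_of_pos (by omega : (0:Int) < 2)]
    omega

def switches_alt (seq : List String) : Int :=
  switchesAltRec seq 0 seq.length

-- ===== PRECONDITION & SPEC =====
def Spec_switches (seq : List String) (out : Int) : Prop := out = switches_alt seq
instance (seq : List String) (out : Int) : Decidable (Spec_switches seq out) := by unfold Spec_switches; infer_instance

-- ===== CLAIM (what is proved, stated in full; the proofs are below) =====
def Claim_equal_switches : Prop := ∀ (seq : List String), Dom_switches seq → Spec_switches seq (switches seq)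

-- ===== LEMMAS AND PROOFS =====
-- 1 if the values at positions i and i-1 differ, else 0
def pvInd (seq : List String) (i : Int) : Int :=
  if PySem.List.pyGet? seq i ≠ PySem.List.pyGet? seq (i - 1) then 1 else 0

-- the number of adjacent changes strictly inside [lo, hi): sum of pvInd over (lo, hi)
-- (proof-only helper, never executed; noncomputable only because Int's interval instance is)
noncomputable def pvCount (seq : List String) (lo hi : Int) : Int :=
  ∑ i ∈ Finset.Ico (lo + 1) hi, pvInd seq i

theorem pvCount_empty (seq : List String) (lo hi : Int) (h : hi ≤ lo + 1) :
    pvCount seq lo hi = 0 := by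
  unfold pvCount
  rw [Finset.Ico_eq_empty (by omega), Finset.sum_empty]

theorem pvCount_split (seq : List String) (a b c : Int) (hab : a < b) (hbc : b < c) :
    pvCount seq a c = pvCount seq a b + pvInd seq b + pvCount seq b c := by
  unfold pvCount
  rw [← Finset.Ico_union_Ico_eq_Ico (by omega : a + 1 ≤ b) (by omega : b ≤ c),
    Finset.sum_union (Finset.Ico_disjoint_Ico_consecutive (a+1) b c),
    ← Finset.Ico_union_Ico_eq_Ico (by omega : b ≤ b + 1) (by omega : b + 1 ≤ c),
    Finset.sum_union (Finset.Ico_disjoint_Ico_consecutive b (b+1) c),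
    show Finset.Ico b (b+1) = {b} from by
      rw [Finset.Ico_add_one_right_eq_Icc, Finset.Icc_self],
    Finset.sum_singleton]
  ring

theorem switchesAltRec_eq (seq : List String) (lo hi : Int) :
    switchesAltRec seq lo hi = pvCount seq lo hi := by
  induction hn : (hi - lo).toNat using Nat.strong_induction_on generalizing lo hi with
  | _ n ih =>
    rw [switchesAltRec]
    split
    · rw [pvCount_empty seq lo hi (by omega)]
    · rename_i hbig
      have hmid : PySem.Int.floordiv (lo + hi) 2 = (lo + hi) / 2 :=
        PySem.Int.floordiv_eq_ediv_of_pos (by omega)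
      rw [hmid]
      have h1 : lo < (lo + hi) / 2 := by omega
      have h2 : (lo + hi) / 2 < hi := by omega
      rw [ih ((lo + hi) / 2 - lo).toNat (by omega) lo ((lo + hi) / 2) rfl,
        ih (hi - (lo + hi) / 2).toNat (by omega) ((lo + hi) / 2) hi rfl,
        pvCount_split seq lo ((lo + hi) / 2) hi h1 h2]
      unfold pvInd
      ring

theorem pvInd_cons (x : String) (xs : List String) (i : Int) (h : 1 ≤ i) :
    pvInd (x :: xs) (i + 1) = pvInd xs i := by
  have g : ∀ (j : Int), 1 ≤ j → PySem.List.pyGet? (x :: xs) j = PySem.List.pyGet? xs (j - 1) := by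
    intro j hj
    obtain ⟨n, rfl⟩ : ∃ n : Nat, j = (n : Int) + 1 := ⟨(j - 1).toNat, by omega⟩
    rw [PySem.List.pyGet?_cons_succ]
    norm_num
  unfold pvInd
  have e : i + 1 - 1 = i := by ring
  rw [e, g (i + 1) (by omega), e, g i h]

theorem switchesGo_eq (rest : List String) : ∀ (last : String) (s : Int),
    switchesGo last s rest = s + pvCount (last :: rest) 0 (1 + rest.length) := by
  induction rest with
  | nil =>
    intro last s
    rw [switchesGo, pvCount_empty _ _ _ (by norm_num)]
    ring
  | cons y ys ih =>
    intro last s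
    have key : pvCount (last :: y :: ys) 0 (1 + (y :: ys).length) =
        (if y ≠ last then (1:Int) else 0) + pvCount (y :: ys) 0 (1 + ys.length) := by
      rw [show ((1 : Int) + ((y :: ys).length : Int)) = 2 + (ys.length : Int) from by
        simp [List.length_cons]; omega]
      rw [pvCount_split (last :: y :: ys) 0 1 (2 + ys.length) (by omega) (by omega),
        pvCount_empty _ _ _ (by omega)]
      have hind : pvInd (last :: y :: ys) 1 = if y ≠ last then (1:Int) else 0 := by
        have h1 : PySem.List.pyGet? (last :: y :: ys) 1 = some y := by
          rw [show (1 : Int) = ((0 : Nat) : Int) + 1 from by norm_num,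
            PySem.List.pyGet?_cons_succ,
            show ((0 : Nat) : Int) = 0 from rfl, PySem.List.pyGet?_zero_cons]
        unfold pvInd
        rw [show (1 : Int) - 1 = 0 from by ring, h1, PySem.List.pyGet?_zero_cons]
        simp
      have hshift : pvCount (last :: y :: ys) 1 (2 + ys.length) = pvCount (y :: ys) 0 (1 + ys.length) := by
        unfold pvCount
        rw [show ((2 : Int) + (ys.length : Int)) = (1 + ys.length) + 1 from by ring,
          show ((1 : Int) + 1) = 0 + 1 + 1 from by ring,
          ← Finset.sum_Ico_add' (pvInd (last :: y :: ys)) (0 + 1) (1 + ys.length) 1]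
        apply Finset.sum_congr rfl
        intro i hi
        rw [Finset.mem_Ico] at hi
        exact pvInd_cons last (y :: ys) i (by omega)
      rw [hind, hshift]
      ring
    rw [switchesGo, key]
    by_cases h : y = last
    · subst h
      simp only [ne_eq, not_true_eq_false, if_false, ih]
      ring
    · simp only [ne_eq, h, not_false_eq_true, if_true, ih]
      ring

-- ===== VERDICT (by name: the statement is the Claim_ definition above) =====
theorem switches_spec : Claim_equal_switches := by
  intro seq _
  unfold Spec_switches switches_alt
  cases seq with
  | nil => rw [show switches [] = 0 from rfl, switchesAltRec]; rfl
  | cons first rest =>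
    rw [show switches (first :: rest) = switchesGo first 0 rest from rfl,
      switchesAltRec_eq, switchesGo_eq rest first 0]
    rw [show ((first :: rest).length : Int) = 1 + (rest.length : Int) from by
      simp [List.length_cons]; omega]
    ring
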